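-- pv_equiv track=rewrite | github.com/ElDavoC/programming-practice | Python/Implementation/larry_array.py | rec_array
-- ===== SOURCE A (Python) =====
-- def rec_array(A):
--     if A[0] == sorted(A)[0] and len(A) == 3:
--         return A
--
--     if A[0] == sorted(A)[0]:
--         return A[0:1] + rec_array(A[1:])
--     else:
--         next = sorted(A)[0]
--         next_pos = A.index(next)
--         if next_pos == len(A) - 1:
--             prov = A[-3:]
--         else:
--             prov = A[next_pos - 1: next_pos + 2]
--
--         if prov[1] == next:
--             prov = [next] + prov[2:] + prov[0:1]
--         elif prov[2] == next:
--             prov = [next] + prov[0:2]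
--
--         if next_pos == len(A) - 1:
--             A = A[:-3] + prov
--         else:
--             A = A[0:next_pos - 1] + prov + A[next_pos + 2:]
--
--         return rec_array(A)
-- ===== SOURCE B (Python) =====
-- def rec_array(A):
--     # Iterative in-place version: sort once, then rotate each successive minimum
--     # to the front while tracking its position (no re-sorting, no re-searching).
--     B = list(A)
--     n = len(B)
--     ms = sorted(B)
--     i = 0
--     while True:
--         m = ms[i]
--         p = B.index(m, i)
--         while p > i:
--             if p == n - 1:
--                 B[n-3], B[n-2], B[n-1] = m, B[n-3], B[n-2]
--                 p = n - 3
--             else: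
--                 B[p-1], B[p], B[p+1] = m, B[p+1], B[p-1]
--                 p -= 1
--         if n - i == 3:
--             return B
--         i += 1
-- ===== Notes on version B (the rewrite author's own statement) =====
-- stated objective: faster
-- what changed: A's recursion re-sorts the whole suffix and re-searches the minimum's index after every single triple rotation; B sorts the list once up front, takes each suffix minimum from that sorted list, and tracks the minimum's position across the rotations in an iterative in-place two-loop version.
import Mathlib
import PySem

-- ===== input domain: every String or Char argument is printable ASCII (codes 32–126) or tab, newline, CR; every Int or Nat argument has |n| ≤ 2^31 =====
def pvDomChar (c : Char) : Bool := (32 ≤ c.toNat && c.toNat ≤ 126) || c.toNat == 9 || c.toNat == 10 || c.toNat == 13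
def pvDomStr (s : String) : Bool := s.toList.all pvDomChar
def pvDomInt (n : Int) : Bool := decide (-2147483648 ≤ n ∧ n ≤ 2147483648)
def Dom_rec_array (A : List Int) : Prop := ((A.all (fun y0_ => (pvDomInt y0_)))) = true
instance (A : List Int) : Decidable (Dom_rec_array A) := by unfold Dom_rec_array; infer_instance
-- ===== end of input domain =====

-- B replaces A's re-sort-and-re-search-per-rotation recursion by an iterative two-loop
-- in-place version (asymptotically faster). Return-value equivalence on lists of length ≥ 3;
-- neither Python mutates the caller's list.

-- ===== PORT A =====
-- Literal port of A's recursion, with a fuel counter as a totality guard only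
-- (the fuel bound exceeds the number of recursive calls on every input Pre_ admits;
-- at fuel 0 the current list is returned).
def rec_array_go : Nat → List Int → List Int
  | 0, A => A
  | fuel+1, A =>
    match PySem.List.pyGet? A 0, PySem.List.pyGet? (PySem.List.sorted A (fun x => x) false) 0 with
    | some a0, some m =>
      if a0 = m ∧ A.length = 3 then A
      else if a0 = m then
        PySem.List.slice A (some 0) (some 1) ++ rec_array_go fuel (PySem.List.slice A (some 1) none)
      else
        match PySem.List.index? A m with
        | none => A
        | some q =>
          let prov :=
            if (q : Int) = (A.length : Int) - 1 then PySem.List.slice A (some (-3)) none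
            else PySem.List.slice A (some ((q : Int) - 1)) (some ((q : Int) + 2))
          let prov :=
            if PySem.List.pyGet? prov 1 = some m then
              [m] ++ PySem.List.slice prov (some 2) none ++ PySem.List.slice prov (some 0) (some 1)
            else if PySem.List.pyGet? prov 2 = some m then
              [m] ++ PySem.List.slice prov (some 0) (some 2)
            else prov
          let A2 :=
            if (q : Int) = (A.length : Int) - 1 then PySem.List.slice A none (some (-3)) ++ prov
            else PySem.List.slice A none (some ((q : Int) - 1)) ++ prov ++
                 PySem.List.slice A (some ((q : Int) + 2)) none
          rec_array_go fuel A2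
    | _, _ => A

def rec_array (A : List Int) : List Int :=
  rec_array_go (A.length * A.length + A.length + 1) A

-- ===== PORT B =====
-- Inner while loop of B: rotate the minimum m leftwards from position p down to i.
-- The B[k] reads/writes are in range on every input Pre_ admits (the getD defaults are
-- never used there); the simultaneous Python assignment reads x, y before the writes.
def altInner (n i : Nat) (m : Int) (p : Nat) (B : List Int) : List Int :=
  if h : i < p then
    if hp : p = n - 1 then
      let x := B.getD (n-3) 0
      let y := B.getD (n-2) 0
      altInner n i m (n-3) (((B.set (n-3) m).set (n-2) x).set (n-1) y)
    else
      let x := B.getD (p+1) 0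
      let y := B.getD (p-1) 0
      altInner n i m (p-1) (((B.set (p-1) m).set p x).set (p+1) y)
  else B
termination_by p - i
decreasing_by all_goals omega

-- Outer while loop of B; ms is the list sorted once up front (ms[i] is the current
-- suffix minimum), the fuel is a totality guard only (the loop advances i every
-- iteration, at most n-2 times on every input Pre_ admits). none branches = Python's
-- IndexError on ms[i] / the impossible index miss, both outside Pre_.
-- B.index(m, i) is ported as i + (first index of m in B.drop i).
def altOuter (n : Nat) (ms : List Int) : Nat → Nat → List Int → List Int
  | 0, _, B => B
  | fuel+1, i, B =>
    match PySem.List.pyGet? ms (i : Int) with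
    | none => B
    | some m =>
      match PySem.List.index? (B.drop i) m with
      | none => B
      | some q =>
        let B2 := altInner n i m (i + q) B
        if n - i = 3 then B2
        else altOuter n ms fuel (i+1) B2

def rec_array_alt (A : List Int) : List Int :=
  altOuter A.length (PySem.List.sorted A (fun x => x) false) A.length 0 A

-- ===== PRECONDITION & SPEC =====
-- A raises IndexError on every list of length < 3 (and only on those); Pre_ excludes exactly them.
def Pre_rec_array (A : List Int) : Prop := 3 ≤ A.length
instance (A : List Int) : Decidable (Pre_rec_array A) := by unfold Pre_rec_array; infer_instance
def pvWitness_rec_array : List Int := ([3, 1, 2, 0])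

def Spec_rec_array (A : List Int) (out : List Int) : Prop := out = rec_array_alt A
instance (A : List Int) (out : List Int) : Decidable (Spec_rec_array A out) := by unfold Spec_rec_array; infer_instance

-- ===== CLAIM (what is proved, stated in full; the proofs are below) =====
def Claim_equal_rec_array : Prop := ∀ (A : List Int), Dom_rec_array A → Pre_rec_array A → Spec_rec_array A (rec_array A)

-- ===== LEMMAS AND PROOFS =====

def sHead (S : List Int) : Option Int :=
  PySem.List.pyGet? (PySem.List.sorted S (fun x => x) false) 0

def rotS (S : List Int) (m : Int) (q : Nat) : List Int :=
  if q = S.length - 1 then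
    S.take (S.length - 3) ++ [m, S.getD (S.length - 3) 0, S.getD (S.length - 2) 0]
  else
    S.take (q - 1) ++ [m, S.getD (q + 1) 0, S.getD (q - 1) 0] ++ S.drop (q + 2)

lemma sHead_eq_min? (S : List Int) (m : Int)
    (hm : PySem.List.min? S (fun x => x) = some m) : sHead S = some m := by
  have hne : S ≠ [] := List.ne_nil_of_mem (PySem.List.min?_mem hm)
  have hsne : PySem.List.sorted S (fun x => x) false ≠ [] := by
    simp [PySem.List.sorted_eq_nil_iff, hne]
  rcases hs : PySem.List.sorted S (fun x => x) false with _ | ⟨m', t⟩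
  · exact absurd hs hsne
  have h1 : ∀ y ∈ S, m' ≤ y := PySem.List.key_head_sorted_le S (fun x => x) hs
  have h2 : ∀ y ∈ S, m ≤ y := PySem.List.min?_isMin hm
  have hmem : m ∈ S := PySem.List.min?_mem hm
  have hmem' : m' ∈ S := by
    have : m' ∈ PySem.List.sorted S (fun x => x) false := by rw [hs]; simp
    rwa [PySem.List.mem_sorted] at this
  have : m' = m := le_antisymm (h1 m hmem) (h2 m' hmem')
  simp [sHead, hs, this, PySem.List.pyGet?, PySem.List.pyIdx?]

lemma three_window (S : List Int) (p : Nat) (h : p + 3 ≤ S.length) :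
    (S.drop p).take 3 = [S.getD p 0, S.getD (p+1) 0, S.getD (p+2) 0] := by
  induction p generalizing S with
  | zero => rcases S with _ | ⟨x, _ | ⟨y, _ | ⟨z, rest⟩⟩⟩ <;> simp_all
  | succ p ih =>
    rcases S with _ | ⟨x, S'⟩
    · simp at h
    · simp only [List.length_cons] at h
      simpa using ih S' (by omega)

lemma decomp3 (S : List Int) (p : Nat) (h : p + 3 ≤ S.length) :
    S = S.take p ++ [S.getD p 0, S.getD (p+1) 0, S.getD (p+2) 0] ++ S.drop (p+3) := by
  conv_lhs => rw [← List.take_append_drop p S]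
  rw [← three_window S p h]
  rw [List.append_assoc]
  congr 1
  rw [← List.drop_drop]
  exact (List.take_append_drop 3 (S.drop p)).symm

lemma set3_splice (C : List Int) (t : Nat) (a b c : Int) (h : t + 3 ≤ C.length) :
    ((C.set t a).set (t+1) b).set (t+2) c = C.take t ++ [a, b, c] ++ C.drop (t+3) := by
  induction t generalizing C with
  | zero =>
    rcases C with _ | ⟨x, _ | ⟨y, _ | ⟨z, rest⟩⟩⟩ <;> simp_all
  | succ t ih =>
    rcases C with _ | ⟨x, C'⟩
    · simp at h
    · simp only [List.length_cons] at h
      simpa [List.set_cons_succ, List.take_succ_cons, List.drop_succ_cons] using ih C' (by omega)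

lemma perm_rot3 (a b c : Int) : ([a, b, c] : List Int).Perm [b, c, a] :=
  List.Perm.trans (List.Perm.swap b a [c]) (List.Perm.cons b (List.Perm.swap c a []))

lemma not_mem_take (S : List Int) (m : Int) (q k : Nat)
    (hq : PySem.List.index? S m = some q) (hk : k ≤ q) : m ∉ S.take k := by
  intro hmem
  obtain ⟨hql, hSq, hbefore⟩ := PySem.List.getElem_of_index?_eq_some hq
  obtain ⟨j, hj, hval⟩ := List.getElem_of_mem hmem
  rw [List.getElem_take] at hval
  exact hbefore j (by simp at hj; omega) hval

lemma rotS_length (S : List Int) (m : Int) (q : Nat) (h3 : 3 ≤ S.length)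
    (hq : PySem.List.index? S m = some q) (hq1 : 1 ≤ q) :
    (rotS S m q).length = S.length := by
  obtain ⟨hql, hSq, hbefore⟩ := PySem.List.getElem_of_index?_eq_some hq
  unfold rotS
  split <;> simp <;> omega

lemma rotS_perm (S : List Int) (m : Int) (q : Nat) (h3 : 3 ≤ S.length)
    (hq : PySem.List.index? S m = some q) (hq1 : 1 ≤ q) :
    (rotS S m q).Perm S := by
  obtain ⟨hql, hSq, hbefore⟩ := PySem.List.getElem_of_index?_eq_some hq
  have hgd : ∀ j (h : j < S.length), S.getD j 0 = S[j] := fun j h => List.getD_eq_getElem S 0 h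
  unfold rotS
  split
  · -- q = S.length - 1
    rename_i hcase
    have hm1 : S.getD (S.length - 1) 0 = m := by
      subst hcase; exact (hgd _ (by omega)).trans hSq
    have hd : S = S.take (S.length - 3) ++
        [S.getD (S.length-3) 0, S.getD (S.length-2) 0, S.getD (S.length-1) 0] ++
        S.drop (S.length - 3 + 3) := by
      have := decomp3 S (S.length - 3) (by omega)
      rw [show S.length - 3 + 1 = S.length - 2 by omega, show S.length - 3 + 2 = S.length - 1 by omega] at this
      exact this
    conv_rhs => rw [hd]
    rw [show S.length - 3 + 3 = S.length by omega, List.drop_length, List.append_nil, hm1]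
    refine List.Perm.append_left _ ?_
    exact perm_rot3 m _ _
  · -- middle
    rename_i hcase
    have hd : S = S.take (q - 1) ++
        [S.getD (q-1) 0, S.getD q 0, S.getD (q+1) 0] ++ S.drop (q - 1 + 3) := by
      have := decomp3 S (q - 1) (by omega)
      rw [show q - 1 + 1 = q by omega, show q - 1 + 2 = q + 1 by omega] at this
      exact this
    conv_rhs => rw [hd]
    rw [show q - 1 + 3 = q + 2 by omega]
    refine List.Perm.append_right _ ?_
    refine List.Perm.append_left _ ?_
    rw [hgd q hql, hSq]
    exact (perm_rot3 _ m _).symm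

lemma rotS_sHead (S : List Int) (m : Int) (q : Nat) (h3 : 3 ≤ S.length)
    (hq : PySem.List.index? S m = some q) (hq1 : 1 ≤ q) (hm : sHead S = some m) :
    sHead (rotS S m q) = some m := by
  unfold sHead at hm ⊢
  rw [PySem.List.sorted_eq_sorted_of_perm (rotS S m q) S (fun x => x)
    (fun a b h => h) (rotS_perm S m q h3 hq hq1)]
  exact hm

lemma rotS_index (S : List Int) (m : Int) (q : Nat) (h3 : 3 ≤ S.length)
    (hq : PySem.List.index? S m = some q) (hq1 : 1 ≤ q) :
    PySem.List.index? (rotS S m q) m =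
      some (if q = S.length - 1 then S.length - 3 else q - 1) := by
  obtain ⟨hql, hSq, hbefore⟩ := PySem.List.getElem_of_index?_eq_some hq
  unfold rotS
  split <;> rename_i hcase <;> rw [PySem.List.index?_eq_some_iff]
  · refine ⟨S.take (S.length - 3), [S.getD (S.length-3) 0, S.getD (S.length-2) 0],
      by simp, ?_, not_mem_take S m q _ hq (by omega)⟩
    · simp
      try omega
  · refine ⟨S.take (q - 1), [S.getD (q+1) 0, S.getD (q-1) 0] ++ S.drop (q + 2),
      by simp, ?_, not_mem_take S m q _ hq (by omega)⟩
    · simp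
      try omega

lemma pyGet?_head (a : Int) (S : List Int) : PySem.List.pyGet? (a :: S) 0 = some a := by
  simp [PySem.List.pyGet?, PySem.List.pyIdx?]

lemma stepA (S : List Int) (m : Int) (h3 : S.length = 3)
    (hm : sHead S = some m) (hq : PySem.List.index? S m = some 0) (fuel : Nat) :
    rec_array_go (fuel+1) S = S := by
  rw [PySem.List.index?_eq_some_iff] at hq
  obtain ⟨pre, suf, hS, hlen, -⟩ := hq
  rw [List.length_eq_zero_iff.mp hlen] at hS
  simp only [List.nil_append] at hS
  subst hS
  unfold sHead at hm
  simp only [rec_array_go, pyGet?_head, hm, h3, and_true]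
  exact if_pos trivial

lemma stepB (S : List Int) (m : Int) (h3 : 3 ≤ S.length) (h4 : S.length ≠ 3)
    (hm : sHead S = some m) (hq : PySem.List.index? S m = some 0) (fuel : Nat) :
    rec_array_go (fuel+1) S = S.take 1 ++ rec_array_go fuel (S.drop 1) := by
  rw [PySem.List.index?_eq_some_iff] at hq
  obtain ⟨pre, suf, hS, hlen, -⟩ := hq
  rw [List.length_eq_zero_iff.mp hlen] at hS
  simp only [List.nil_append] at hS
  subst hS
  unfold sHead at hm
  simp only [rec_array_go, pyGet?_head, hm]
  rw [if_neg (by simp only [List.length_cons] at h4 ⊢; omega), if_pos trivial]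
  simp [pysem]

lemma drop_eq_three (S : List Int) (p : Nat) (h : p + 3 = S.length) :
    S.drop p = [S.getD p 0, S.getD (p+1) 0, S.getD (p+2) 0] := by
  rw [← three_window S p (by omega)]
  exact (List.take_of_length_le (by simp; omega)).symm

lemma stepC (S : List Int) (m : Int) (q : Nat) (h3 : 3 ≤ S.length)
    (hm : sHead S = some m) (hq : PySem.List.index? S m = some q) (hq1 : 1 ≤ q) (fuel : Nat) :
    rec_array_go (fuel+1) S = rec_array_go fuel (rotS S m q) := by
  obtain ⟨hql, hSq, hbefore⟩ := PySem.List.getElem_of_index?_eq_some hq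
  have hgd : ∀ j (h : j < S.length), S.getD j 0 = S[j] := fun j h => List.getD_eq_getElem S 0 h
  rcases hS : S with _ | ⟨s0, S0⟩
  · subst hS; simp at h3
  subst hS
  have hs0 : s0 ≠ m := by
    have := hbefore 0 (by omega)
    simpa using this
  unfold sHead at hm
  simp only [rec_array_go, pyGet?_head, hm, hq]
  rw [if_neg (fun hc => hs0 hc.1), if_neg hs0]
  by_cases hc : q = (s0 :: S0).length - 1
  · -- min is the last element
    have hcI : (q : Int) = ((s0 :: S0).length : Int) - 1 := by
      simp only [List.length_cons] at hc ⊢; omega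
    rw [if_pos hcI, if_pos hcI]
    have hprov : PySem.List.slice (s0 :: S0) (some (-3)) none =
        [(s0 :: S0).getD ((s0 :: S0).length - 3) 0, (s0 :: S0).getD ((s0 :: S0).length - 2) 0, m] := by
      rw [PySem.List.slice_from_neg_ofNat _ 3 (by norm_num),
          drop_eq_three _ _ (by omega)]
      rw [show (s0 :: S0).length - 3 + 1 = (s0 :: S0).length - 2 by omega,
          show (s0 :: S0).length - 3 + 2 = (s0 :: S0).length - 1 by omega]
      rw [hgd ((s0 :: S0).length - 1) (by omega)]
      subst hc
      rw [hSq]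
    rw [hprov]
    have hb : (s0 :: S0).getD ((s0 :: S0).length - 2) 0 ≠ m := by
      rw [hgd _ (by omega)]
      exact hbefore _ (by omega)
    rw [if_neg (by simpa [PySem.List.pyGet?, PySem.List.pyIdx?] using hb),
        if_pos (by simp [PySem.List.pyGet?, PySem.List.pyIdx?])]
    rw [PySem.List.slice_to_neg_ofNat _ 3 (by norm_num)]
    unfold rotS
    rw [if_pos hc]
    congr 1
  · -- min is in the middle
    have hcI : ¬ ((q : Int) = ((s0 :: S0).length : Int) - 1) := by
      simp only [List.length_cons] at hc ⊢; omega
    rw [if_neg hcI, if_neg hcI]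
    have hq2 : q + 2 ≤ (s0 :: S0).length := by
      simp only [List.length_cons] at hc hql ⊢; omega
    have hprov : PySem.List.slice (s0 :: S0) (some ((q : Int) - 1)) (some ((q : Int) + 2)) =
        [(s0 :: S0).getD (q-1) 0, m, (s0 :: S0).getD (q+1) 0] := by
      rw [show ((q : Int) - 1) = ((q - 1 : Nat) : Int) by omega,
          show ((q : Int) + 2) = ((q + 2 : Nat) : Int) by omega,
          PySem.List.slice_natCast]
      rw [show q + 2 - (q - 1) = 3 by omega, three_window _ _ (by omega)]
      rw [show q - 1 + 1 = q by omega, show q - 1 + 2 = q + 1 by omega, hgd q hql, hSq]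
    rw [hprov]
    rw [if_pos (by simp [PySem.List.pyGet?, PySem.List.pyIdx?])]
    unfold rotS
    rw [if_neg hc]
    congr 1
    rw [PySem.List.slice_from _ (show (0:Int) ≤ 2 by norm_num),
        PySem.List.slice_zero_start, PySem.List.slice_to _ (show (0:Int) ≤ 1 by norm_num)]
    rw [show ((q : Int) - 1) = ((q - 1 : Nat) : Int) by omega,
        show ((q : Int) + 2) = ((q + 2 : Nat) : Int) by omega,
        PySem.List.slice_to_natCast, PySem.List.slice_from_natCast]
    simp

lemma exists_mq (S : List Int) (hne : S ≠ []) :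
    ∃ m q, sHead S = some m ∧ PySem.List.index? S m = some q ∧ q < S.length := by
  rcases h : PySem.List.min? S (fun x => x) with _ | m
  · exact absurd ((PySem.List.min?_eq_none_iff S _).mp h) hne
  have hmem : m ∈ S := PySem.List.min?_mem h
  have hidx : (PySem.List.index? S m).isSome := (PySem.List.index?_isSome_iff S m).mpr hmem
  rcases hq : PySem.List.index? S m with _ | q
  · rw [hq] at hidx; simp at hidx
  obtain ⟨hql, -, -⟩ := PySem.List.getElem_of_index?_eq_some hq
  exact ⟨m, q, sHead_eq_min? S m h, hq, hql⟩

lemma sq_step (k : Nat) : (k+3)*(k+3) + (k+4) ≤ (k+4)*(k+4) := by nlinarith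

lemma go_irrel : ∀ N fa fb (S : List Int) (m : Int) (q : Nat), 3 ≤ S.length →
    sHead S = some m → PySem.List.index? S m = some q →
    S.length * S.length + q ≤ N → S.length * S.length + q < fa → S.length * S.length + q < fb →
    rec_array_go fa S = rec_array_go fb S := by
  intro N
  induction N using Nat.strong_induction_on with
  | _ N ih =>
    intro fa fb S m q h3 hm hq hN hfa hfb
    obtain ⟨fa, rfl⟩ : ∃ k, fa = k + 1 := ⟨fa - 1, by omega⟩
    obtain ⟨fb, rfl⟩ : ∃ k, fb = k + 1 := ⟨fb - 1, by omega⟩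
    rcases Nat.eq_zero_or_pos q with hq0 | hq1
    · subst hq0
      by_cases h4 : S.length = 3
      · rw [stepA S m h4 hm hq fa, stepA S m h4 hm hq fb]
      · rw [stepB S m h3 h4 hm hq fa, stepB S m h3 h4 hm hq fb]
        congr 1
        have hne : S.drop 1 ≠ [] := by
          intro h; have := congrArg List.length h; simp at this; omega
        obtain ⟨m', q', hm', hq', hql'⟩ := exists_mq (S.drop 1) hne
        obtain ⟨k, hk⟩ : ∃ k, S.length = k + 4 := ⟨S.length - 4, by omega⟩
        have hlen : (S.drop 1).length = k + 3 := by simp [hk]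
        have hms : (S.drop 1).length * (S.drop 1).length + q' < S.length * S.length := by
          rw [hlen, hk]
          have h1 := sq_step k
          have : q' < k + 3 := by rw [← hlen]; exact hql'
          omega
        refine ih ((S.drop 1).length * (S.drop 1).length + q') (by omega) fa fb (S.drop 1)
          m' q' (by rw [hlen]; omega) hm' hq' le_rfl (by omega) (by omega)
    · rw [stepC S m q h3 hm hq hq1 fa, stepC S m q h3 hm hq hq1 fb]
      have hL := rotS_length S m q h3 hq hq1
      have hsh := rotS_sHead S m q h3 hq hq1 hm
      have hix := rotS_index S m q h3 hq hq1
      obtain ⟨hql, -, -⟩ := PySem.List.getElem_of_index?_eq_some hq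
      set q' := if q = S.length - 1 then S.length - 3 else q - 1 with hq'def
      have hq'lt : q' < q := by rw [hq'def]; split <;> omega
      have hms : (rotS S m q).length * (rotS S m q).length + q' < S.length * S.length + q := by
        rw [hL]; omega
      exact ih ((rotS S m q).length * (rotS S m q).length + q') (by omega) fa fb (rotS S m q)
        m q' (by omega) hsh hix le_rfl (by omega) (by omega)

def goS (S : List Int) : List Int :=
  rec_array_go (S.length * S.length + S.length + 1) S

lemma goS_irrel (S : List Int) (m : Int) (q : Nat) (h3 : 3 ≤ S.length)
    (hm : sHead S = some m) (hq : PySem.List.index? S m = some q) (fuel : Nat)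
    (hfuel : S.length * S.length + q < fuel) : rec_array_go fuel S = goS S := by
  obtain ⟨hql, -, -⟩ := PySem.List.getElem_of_index?_eq_some hq
  exact go_irrel (S.length * S.length + q) fuel (S.length * S.length + S.length + 1)
    S m q h3 hm hq le_rfl hfuel (by omega)

lemma eqA (S : List Int) (m : Int) (h3 : S.length = 3)
    (hm : sHead S = some m) (hq : PySem.List.index? S m = some 0) : goS S = S := by
  unfold goS
  rw [h3]
  exact stepA S m h3 hm hq 12

lemma eqB (S : List Int) (m : Int) (h3 : 3 ≤ S.length) (h4 : S.length ≠ 3)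
    (hm : sHead S = some m) (hq : PySem.List.index? S m = some 0) :
    goS S = S.take 1 ++ goS (S.drop 1) := by
  have hF : S.length * S.length + S.length + 1 = (S.length * S.length + S.length) + 1 := rfl
  unfold goS
  rw [hF, stepB S m h3 h4 hm hq]
  congr 1
  have hne : S.drop 1 ≠ [] := by
    intro h; have := congrArg List.length h; simp at this; omega
  obtain ⟨m', q', hm', hq', hql'⟩ := exists_mq (S.drop 1) hne
  refine goS_irrel (S.drop 1) m' q' (by simp; omega) hm' hq' _ ?_
  obtain ⟨k, hk⟩ : ∃ k, S.length = k + 4 := ⟨S.length - 4, by omega⟩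
  have hlen : (S.drop 1).length = k + 3 := by simp [hk]
  have h1 := sq_step k
  have : q' < k + 3 := by rw [← hlen]; exact hql'
  rw [hlen, hk]
  omega

lemma eqC (S : List Int) (m : Int) (q : Nat) (h3 : 3 ≤ S.length)
    (hm : sHead S = some m) (hq : PySem.List.index? S m = some q) (hq1 : 1 ≤ q) :
    goS S = goS (rotS S m q) := by
  have hF : S.length * S.length + S.length + 1 = (S.length * S.length + S.length) + 1 := rfl
  unfold goS
  rw [hF, stepC S m q h3 hm hq hq1]
  have hL := rotS_length S m q h3 hq hq1
  have hsh := rotS_sHead S m q h3 hq hq1 hm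
  have hix := rotS_index S m q h3 hq hq1
  obtain ⟨hql, -, -⟩ := PySem.List.getElem_of_index?_eq_some hq
  rw [← hL]
  refine goS_irrel (rotS S m q) m _ (by omega) hsh hix _ ?_
  rw [hL]
  split <;> omega

lemma getD_drop' (C : List Int) (i k : Nat) : (C.drop i).getD k 0 = C.getD (i+k) 0 := by
  simp [List.getD_eq_getElem?_getD, List.getElem?_drop]

lemma inner_sim : ∀ q (C : List Int) (i : Nat) (m : Int), i + 3 ≤ C.length →
    sHead (C.drop i) = some m → PySem.List.index? (C.drop i) m = some q →
    (altInner C.length i m (i+q) C).take i = C.take i ∧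
    (altInner C.length i m (i+q) C).length = C.length ∧
    PySem.List.index? ((altInner C.length i m (i+q) C).drop i) m = some 0 ∧
    sHead ((altInner C.length i m (i+q) C).drop i) = some m ∧
    ((altInner C.length i m (i+q) C).drop i).Perm (C.drop i) ∧
    goS ((altInner C.length i m (i+q) C).drop i) = goS (C.drop i) := by
  intro q
  induction q using Nat.strong_induction_on with
  | _ q ih =>
    intro C i m hi hm hq
    rcases Nat.eq_zero_or_pos q with hq0 | hq1
    · subst hq0
      rw [altInner, dif_neg (by omega)]
      exact ⟨rfl, rfl, by simpa using hq, hm, List.Perm.refl _, rfl⟩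
    · have hlenS : (C.drop i).length = C.length - i := by simp
      obtain ⟨hql, hSq, hbefore⟩ := PySem.List.getElem_of_index?_eq_some hq
      have h3S : 3 ≤ (C.drop i).length := by omega
      have heqC := eqC (C.drop i) m q h3S hm hq hq1
      have hperm := rotS_perm (C.drop i) m q h3S hq hq1
      have hL := rotS_length (C.drop i) m q h3S hq hq1
      have hsh := rotS_sHead (C.drop i) m q h3S hq hq1 hm
      have hix := rotS_index (C.drop i) m q h3S hq hq1
      by_cases hp : i + q = C.length - 1
      · -- last-position rotation
        have hcase : q = (C.drop i).length - 1 := by omega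
        set n := C.length with hn
        have hC2 : ((C.set (n-3) m).set (n-2) (C.getD (n-3) 0)).set (n-1) (C.getD (n-2) 0)
            = C.take (n-3) ++ [m, C.getD (n-3) 0, C.getD (n-2) 0] ++ C.drop n := by
          have := set3_splice C (n-3) m (C.getD (n-3) 0) (C.getD (n-2) 0) (by omega)
          rw [show n-3+1 = n-2 by omega, show n-3+2 = n-1 by omega, show n-3+3 = n by omega] at this
          exact this
        rw [altInner]
        simp only [dif_pos (show i < i + q by omega), dif_pos hp]
        rw [hC2]
        set C2 := C.take (n-3) ++ [m, C.getD (n-3) 0, C.getD (n-2) 0] ++ C.drop n with hC2def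
        have hC2len : C2.length = n := by
          rw [hC2def]; simp; omega
        have hC2take : C2.take i = C.take i := by
          rw [hC2def, List.append_assoc, List.take_append_of_le_length (by simp; omega),
              List.take_take, min_eq_left (by omega)]
        have hC2drop : C2.drop i = rotS (C.drop i) m q := by
          rw [hC2def, List.append_assoc, List.drop_append_of_le_length (by simp; omega),
              List.drop_take]
          rw [List.drop_length, List.append_nil]
          unfold rotS
          rw [if_pos hcase, hlenS]
          rw [getD_drop', getD_drop', show i + (n - i - 3) = n - 3 by omega,
              show i + (n - i - 2) = n - 2 by omega]
          rw [show n - 3 - i = n - i - 3 from by omega]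
        have hq' : PySem.List.index? (C2.drop i) m = some ((C.drop i).length - 3) := by
          rw [hC2drop, hix, if_pos hcase]
        have hm' : sHead (C2.drop i) = some m := by rw [hC2drop]; exact hsh
        have harg : n - 3 = i + ((C.drop i).length - 3) := by omega
        have := ih ((C.drop i).length - 3) (by omega) C2 i m (by rw [hC2len]; exact hi) hm'
          hq'
        rw [hC2len] at this
        rw [harg]
        obtain ⟨t1, t2, t3, t4, t6, t5⟩ := this
        exact ⟨t1.trans hC2take, t2.trans hn, t3, t4,
          t6.trans (by rw [hC2drop]; exact hperm),
          t5.trans (by rw [hC2drop, ← heqC])⟩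
      · -- middle rotation
        have hcase : ¬ (q = (C.drop i).length - 1) := by omega
        set n := C.length with hn
        have hC2 : ((C.set (i+q-1) m).set (i+q) (C.getD (i+q+1) 0)).set (i+q+1) (C.getD (i+q-1) 0)
            = C.take (i+q-1) ++ [m, C.getD (i+q+1) 0, C.getD (i+q-1) 0] ++ C.drop (i+q+2) := by
          have := set3_splice C (i+q-1) m (C.getD (i+q+1) 0) (C.getD (i+q-1) 0) (by omega)
          rw [show i+q-1+1 = i+q by omega, show i+q-1+2 = i+q+1 by omega,
              show i+q-1+3 = i+q+2 by omega] at this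
          exact this
        rw [altInner]
        simp only [dif_pos (show i < i + q by omega), dif_neg hp]
        rw [hC2]
        set C2 := C.take (i+q-1) ++ [m, C.getD (i+q+1) 0, C.getD (i+q-1) 0] ++ C.drop (i+q+2)
          with hC2def
        have hC2len : C2.length = n := by
          rw [hC2def]; simp; omega
        have hC2take : C2.take i = C.take i := by
          rw [hC2def, List.append_assoc, List.take_append_of_le_length (by simp; omega),
              List.take_take, min_eq_left (by omega)]
        have hC2drop : C2.drop i = rotS (C.drop i) m q := by
          rw [hC2def, List.append_assoc, List.drop_append_of_le_length (by simp; omega),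
              List.drop_take]
          unfold rotS
          rw [if_neg hcase]
          rw [getD_drop', getD_drop', show i + (q+1) = i+q+1 by omega,
              show i + (q-1) = i+q-1 by omega, List.drop_drop,
              show i + (q + 2) = i+q+2 by omega, show i+q-1-i = q-1 by omega]
          simp [List.append_assoc]
        have hq' : PySem.List.index? (C2.drop i) m = some (q - 1) := by
          rw [hC2drop, hix, if_neg hcase]
        have hm' : sHead (C2.drop i) = some m := by rw [hC2drop]; exact hsh
        have harg : i + q - 1 = i + (q - 1) := by omega
        have := ih (q - 1) (by omega) C2 i m (by rw [hC2len]; exact hi) hm'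
          hq'
        rw [hC2len] at this
        rw [harg]
        obtain ⟨t1, t2, t3, t4, t6, t5⟩ := this
        exact ⟨t1.trans hC2take, t2.trans hn, t3, t4,
          t6.trans (by rw [hC2drop]; exact hperm),
          t5.trans (by rw [hC2drop, ← heqC])⟩

lemma sorted_cons_min (x : Int) (t : List Int) (h : ∀ y ∈ t, x ≤ y) :
    PySem.List.sorted (x :: t) (fun z => z) false = x :: PySem.List.sorted t (fun z => z) false := by
  refine PySem.List.eq_of_perm_of_pairwise_le_of_injective (fun z => z) (fun a b hh => hh)
    ?_ (PySem.List.sorted_pairwise _ _) ?_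
  · exact (PySem.List.sorted_perm _ _ _).trans
      (List.Perm.cons x (PySem.List.sorted_perm t _ false).symm)
  · refine List.pairwise_cons.mpr ⟨fun y hy => h y ?_, PySem.List.sorted_pairwise _ _⟩
    rwa [PySem.List.mem_sorted] at hy

lemma outer_sim : ∀ fuelB (C : List Int) (i : Nat) (ms : List Int), i + 3 ≤ C.length →
    C.length - i ≤ fuelB + 2 →
    ms = C.take i ++ PySem.List.sorted (C.drop i) (fun x => x) false →
    altOuter C.length ms fuelB i C = C.take i ++ goS (C.drop i) := by
  intro fuelB
  induction fuelB with
  | zero => intro C i ms hi hf hms; omega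
  | succ fuel ih =>
    intro C i ms hi hf hms
    have hne : C.drop i ≠ [] := by
      intro h; have := congrArg List.length h; simp at this; omega
    rcases hs : PySem.List.sorted (C.drop i) (fun x => x) false with _ | ⟨m, st⟩
    · exact absurd ((PySem.List.sorted_eq_nil_iff _ _ _).mp hs) hne
    have hm : sHead (C.drop i) = some m := by
      unfold sHead; rw [hs]; exact pyGet?_head m st
    have htake : (C.take i).length = i := by simp; omega
    have hget : PySem.List.pyGet? ms (i : Int) = some m := by
      rw [PySem.List.pyGet?_natCast, hms, hs, List.getElem?_append_right (by omega), htake]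
      simp
    have hmem : m ∈ C.drop i := by
      rw [← PySem.List.mem_sorted (C.drop i) (fun x => x) false, hs]; simp
    rcases hq : PySem.List.index? (C.drop i) m with _ | q
    · rw [PySem.List.index?_eq_none_iff] at hq; exact absurd hmem hq
    obtain ⟨t1, t2, t3, t4, t6, t5⟩ := inner_sim q C i m hi hm hq
    have hlenS : ((altInner C.length i m (i+q) C).drop i).length = C.length - i := by
      rw [List.length_drop, t2]
    rw [altOuter]
    simp only [hget, hq]
    by_cases h3 : C.length - i = 3
    · rw [if_pos h3]
      have : goS ((altInner C.length i m (i+q) C).drop i) = (altInner C.length i m (i+q) C).drop i :=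
        eqA _ m (by omega) t4 t3
      rw [← t5, this] at *
      rw [← t1, List.take_append_drop]
    · rw [if_neg h3]
      set B2 := altInner C.length i m (i+q) C with hB2def
      have hd : B2.drop i = m :: B2.drop (i+1) := by
        rw [PySem.List.index?_eq_some_iff] at t3
        obtain ⟨pre, suf, hsplit, hlen0, -⟩ := t3
        rw [List.length_eq_zero_iff.mp hlen0] at hsplit
        simp only [List.nil_append] at hsplit
        rw [hsplit, ← List.tail_drop, hsplit]
        rfl
      have hmin2 : ∀ y ∈ B2.drop (i+1), m ≤ y := by
        rcases hs2 : PySem.List.sorted (B2.drop i) (fun x => x) false with _ | ⟨m2, st2⟩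
        · rw [(PySem.List.sorted_eq_nil_iff _ _ _).mp hs2] at hd; simp at hd
        · have hm2 : m2 = m := by
            have := t4; unfold sHead at this; rw [hs2, pyGet?_head] at this
            exact Option.some.inj this
          intro y hy
          refine hm2 ▸ PySem.List.key_head_sorted_le (B2.drop i) (fun x => x) hs2 y ?_
          rw [hd]; exact List.mem_cons_of_mem _ hy
      have hsorted2 : PySem.List.sorted (B2.drop i) (fun x => x) false
          = m :: PySem.List.sorted (B2.drop (i+1)) (fun x => x) false := by
        rw [hd]; exact sorted_cons_min m _ hmin2
      have hms' : ms = B2.take (i+1) ++ PySem.List.sorted (B2.drop (i+1)) (fun x => x) false := by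
        have hsC : PySem.List.sorted (C.drop i) (fun x => x) false
            = PySem.List.sorted (B2.drop i) (fun x => x) false :=
          PySem.List.sorted_eq_sorted_of_perm _ _ (fun x => x) (fun a b hh => hh) t6.symm
        rw [hms, hsC, hsorted2, ← t1, List.take_add, hd]
        simp
      have hB2 := ih B2 (i+1) ms (by rw [t2]; omega) (by rw [t2]; omega)
        hms'
      rw [t2] at hB2
      rw [hB2]
      have heqB : goS (B2.drop i) = (B2.drop i).take 1 ++ goS ((B2.drop i).drop 1) :=
        eqB _ m (by omega) (by omega) t4 t3
      rw [← t5, heqB, List.drop_drop]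
      rw [← List.append_assoc]
      congr 1
      rw [← t1, ← List.take_add]

-- ===== VERDICT (by name: the statement is the Claim_ definition above) =====
theorem rec_array_spec : Claim_equal_rec_array := by
  intro A _ hpre
  unfold Pre_rec_array at hpre
  show rec_array A = rec_array_alt A
  have h := outer_sim A.length A 0 (PySem.List.sorted A (fun x => x) false)
    (by omega) (by omega) (by simp)
  show goS A = _
  rw [rec_array_alt, h]
  simp
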